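-- pv_equiv track=rewrite | github.com/Daveyuwang/paperpilot | backend/app/agents/nodes.py | _pick_primary
-- ===== SOURCE A (Python) =====
-- STAGE_ORDER = ["motivation", "approach", "experiments", "takeaways"]
--
-- def _pick_primary(remaining: list[dict], current_stage: str) -> dict | None:
--     current_stage_remaining = [q for q in remaining if q["stage"] == current_stage]
--     if current_stage_remaining:
--         return current_stage_remaining[0]
--     current_idx = STAGE_ORDER.index(current_stage) if current_stage in STAGE_ORDER else 0
--     for stage in STAGE_ORDER[current_idx + 1:]:
--         next_stage_qs = [q for q in remaining if q["stage"] == stage]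
--         if next_stage_qs:
--             return next_stage_qs[0]
--     return remaining[0] if remaining else None
-- ===== SOURCE B (Python) =====
-- STAGE_ORDER = ["motivation", "approach", "experiments", "takeaways"]
--
-- def _pick_primary(remaining, current_stage):
--     current_idx = STAGE_ORDER.index(current_stage) if current_stage in STAGE_ORDER else 0
--     later = {s: i + 1 for i, s in enumerate(STAGE_ORDER[current_idx + 1:])}
--     best = None  # (rank, question), first-seen question of the smallest rank
--     for q in remaining:
--         s = q["stage"]
--         r = 0 if s == current_stage else later.get(s)
--         if r is not None and (best is None or r < best[0]):
--             best = (r, q)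
--     if best is not None:
--         return best[1]
--     return remaining[0] if remaining else None
-- ===== Notes on version B (the rewrite author's own statement) =====
-- stated objective: alternative
-- what changed: Replaces A's up-to-five sequential filter passes over `remaining` (one per candidate stage) by a single pass that ranks each question's stage via a precomputed rank map and keeps the first-seen question of minimal rank.
import Mathlib
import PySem

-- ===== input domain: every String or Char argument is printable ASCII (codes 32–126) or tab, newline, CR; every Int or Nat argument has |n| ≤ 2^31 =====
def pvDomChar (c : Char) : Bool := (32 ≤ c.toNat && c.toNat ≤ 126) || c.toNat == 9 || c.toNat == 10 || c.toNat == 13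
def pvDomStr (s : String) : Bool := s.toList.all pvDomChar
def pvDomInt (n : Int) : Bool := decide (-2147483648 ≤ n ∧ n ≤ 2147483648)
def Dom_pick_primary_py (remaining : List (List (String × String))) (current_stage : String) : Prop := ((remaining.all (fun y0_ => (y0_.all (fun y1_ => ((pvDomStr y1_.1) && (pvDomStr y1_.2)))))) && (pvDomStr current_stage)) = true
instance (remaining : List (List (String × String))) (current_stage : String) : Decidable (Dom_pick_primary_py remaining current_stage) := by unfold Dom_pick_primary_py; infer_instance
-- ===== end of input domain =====

-- B replaces A's sequential per-stage filter passes by one pass keeping the first question of minimal stage rank (alternative decomposition, same behaviour).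


-- ===== PORT A =====
def STAGE_ORDER : List String := ["motivation", "approach", "experiments", "takeaways"]

-- q["stage"] as a first-match association-list lookup (none = KeyError, excluded by Pre_)
def stageGet (q : List (String × String)) : Option String := (PySem.Dict.mk q).get? "stage"

-- STAGE_ORDER.index(current_stage) if current_stage in STAGE_ORDER else 0 (identical line in both Pythons)
def currentIdx (current_stage : String) : Nat :=
  if current_stage ∈ STAGE_ORDER then (PySem.List.index? STAGE_ORDER current_stage).getD 0 else 0

-- the for-loop over STAGE_ORDER[current_idx+1:] with its early return
def pickLoopA (remaining : List (List (String × String))) : List String → Option (List (String × String))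
  | [] => none
  | s :: rest =>
    let next_stage_qs := remaining.filter (fun q => stageGet q == some s)
    if next_stage_qs ≠ [] then next_stage_qs.head? else pickLoopA remaining rest

def pick_primary_py (remaining : List (List (String × String))) (current_stage : String) : Option (List (String × String)) :=
  let current_stage_remaining := remaining.filter (fun q => stageGet q == some current_stage)
  if current_stage_remaining ≠ [] then current_stage_remaining.head?
  else
    -- STAGE_ORDER[current_idx+1:] is List.drop (exact: the start index is a Nat)
    match pickLoopA remaining (STAGE_ORDER.drop (currentIdx current_stage + 1)) with
    | some q => some q
    | none => remaining.head?

-- ===== PORT B =====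
-- later = {s: i + 1 for i, s in enumerate(STAGE_ORDER[current_idx+1:])}
def laterOf (stages : List String) : PySem.Dict String Int :=
  (PySem.List.enumerate stages).foldl (fun d p => d.insert p.2 (p.1 + 1)) PySem.Dict.empty

-- the loop body: rank q's stage, keep the first-seen question of strictly smaller rank
def stepB (later : PySem.Dict String Int) (current_stage : String)
    (best : Option (Int × List (String × String))) (q : List (String × String)) :
    Option (Int × List (String × String)) :=
  let s := (stageGet q).getD ""   -- q["stage"]; missing key is excluded by Pre_
  let r : Option Int := if s == current_stage then some 0 else later.get? s
  match r, best with
  | none, best => best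
  | some r, none => some (r, q)
  | some r, some (rb, qb) => if r < rb then some (r, q) else some (rb, qb)

def pick_primary_py_alt (remaining : List (List (String × String))) (current_stage : String) : Option (List (String × String)) :=
  let later := laterOf (STAGE_ORDER.drop (currentIdx current_stage + 1))
  let best := remaining.foldl (stepB later current_stage) none
  match best with
  | some (_, q) => some q
  | none => remaining.head?

-- ===== PRECONDITION & SPEC =====
-- Pre_ excludes questions without a "stage" key, on which A (and B) raise KeyError.
def Pre_pick_primary_py (remaining : List (List (String × String))) (current_stage : String) : Prop :=
  (remaining.all (fun q => (stageGet q).isSome)) = true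
instance (remaining : List (List (String × String))) (current_stage : String) : Decidable (Pre_pick_primary_py remaining current_stage) := by unfold Pre_pick_primary_py; infer_instance

def pvWitness_pick_primary_py : (List (List (String × String))) × String :=
  ([[("stage", "approach")], [("stage", "motivation")]], "motivation")

def Spec_pick_primary_py (remaining : List (List (String × String))) (current_stage : String) (out : Option (List (String × String))) : Prop := out = pick_primary_py_alt remaining current_stage
instance (remaining : List (List (String × String))) (current_stage : String) (out : Option (List (String × String))) : Decidable (Spec_pick_primary_py remaining current_stage out) := by unfold Spec_pick_primary_py; infer_instance

-- ===== CLAIM (what is proved, stated in full; the proofs are below) =====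
def Claim_equal_pick_primary_py : Prop := ∀ (remaining : List (List (String × String))) (current_stage : String), Dom_pick_primary_py remaining current_stage → Pre_pick_primary_py remaining current_stage → Spec_pick_primary_py remaining current_stage (pick_primary_py remaining current_stage)

-- ===== LEMMAS AND PROOFS =====

-- the stage of a question, defaulted (only used where Pre_ guarantees presence)
def stg (q : List (String × String)) : String := (stageGet q).getD ""

-- rank of a stage in a priority list: first index
def rk : List String → String → Option Int
  | [], _ => none
  | p :: rest, s => if s = p then some 0 else (rk rest s).map (· + 1)

def sgl (ps : List String) (q : List (String × String)) : Option (Int × List (String × String)) :=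
  (rk ps (stg q)).map (fun r => (r, q))

-- keep the earlier-seen entry unless the later one has STRICTLY smaller rank
def mergeP : Option (Int × List (String × String)) → Option (Int × List (String × String)) → Option (Int × List (String × String))
  | none, b => b
  | some a, none => some a
  | some a, some b => if b.1 < a.1 then some b else some a

def bestP (ps : List String) (rem : List (List (String × String))) : Option (Int × List (String × String)) :=
  rem.foldl (fun acc q => mergeP acc (sgl ps q)) none

def seqP (rem : List (List (String × String))) : List String → Option (List (String × String))
  | [] => none
  | s :: rest =>
    let f := rem.filter (fun q => stg q == s)
    if f ≠ [] then f.head? else seqP rem rest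

theorem mergeP_none_right (a : Option (Int × List (String × String))) : mergeP a none = a := by
  cases a <;> rfl

theorem mergeP_assoc (a b c : Option (Int × List (String × String))) :
    mergeP (mergeP a b) c = mergeP a (mergeP b c) := by
  rcases a with _ | a <;> rcases b with _ | b <;> rcases c with _ | c <;>
    simp only [mergeP] <;> (try rfl) <;>
    split_ifs <;> simp only [mergeP] <;> (try rfl) <;> split_ifs <;> first | rfl | omega

theorem foldl_mergeP (ps : List String) (rem : List (List (String × String))) :
    ∀ acc, rem.foldl (fun acc q => mergeP acc (sgl ps q)) acc = mergeP acc (bestP ps rem) := by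
  induction rem with
  | nil => intro acc; simp [bestP, mergeP_none_right]
  | cons q t ih =>
    intro acc
    have hb : bestP ps (q :: t) = mergeP (sgl ps q) (bestP ps t) := by
      simp only [bestP, List.foldl_cons]
      rw [ih]
      rfl
    simp only [List.foldl_cons, hb, ih (mergeP acc (sgl ps q)), mergeP_assoc]

theorem bestP_cons (ps : List String) (q : List (String × String)) (t : List (List (String × String))) :
    bestP ps (q :: t) = mergeP (sgl ps q) (bestP ps t) := by
  simp only [bestP, List.foldl_cons]
  rw [foldl_mergeP]
  rfl

theorem rk_nonneg (ps : List String) (s : String) (r : Int) (h : rk ps s = some r) : 0 ≤ r := by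
  induction ps generalizing r with
  | nil => simp [rk] at h
  | cons p rest ih =>
    simp only [rk] at h
    split at h
    · simp only [Option.some.injEq] at h; omega
    · rcases Option.map_eq_some_iff.mp h with ⟨r', hr', hfr⟩
      have := ih r' hr'
      omega

theorem bestP_nonneg (ps : List String) (rem : List (List (String × String)))
    (p : Int × List (String × String)) (h : bestP ps rem = some p) : 0 ≤ p.1 := by
  induction rem generalizing p with
  | nil => simp [bestP] at h
  | cons q t ih =>
    rw [bestP_cons] at h
    rcases hs : sgl ps q with _ | a <;> rcases hb : bestP ps t with _ | b <;>
      rw [hs, hb] at h <;> simp only [mergeP] at h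
    · exact absurd h (by simp)
    · cases h; exact ih _ hb
    · cases h
      rcases Option.map_eq_some_iff.mp hs with ⟨r', hr', rfl⟩
      exact rk_nonneg _ _ _ hr'
    · split at h <;> cases h
      · exact ih _ hb
      · rcases Option.map_eq_some_iff.mp hs with ⟨r', hr', rfl⟩
        exact rk_nonneg _ _ _ hr'

-- shift (+1 on the rank) commutes with mergeP
theorem mergeP_map_shift (a b : Option (Int × List (String × String))) :
    mergeP (a.map (fun p => (p.1 + 1, p.2))) (b.map (fun p => (p.1 + 1, p.2)))
      = (mergeP a b).map (fun p => (p.1 + 1, p.2)) := by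
  rcases a with _ | a <;> rcases b with _ | b <;> simp only [Option.map_some, Option.map_none, mergeP] <;>
    split_ifs <;> first | rfl | omega

theorem sgl_cons (s : String) (rest : List String) (q : List (String × String)) :
    sgl (s :: rest) q = if stg q = s then some (0, q) else (sgl rest q).map (fun p => (p.1 + 1, p.2)) := by
  simp only [sgl, rk]
  split
  · rfl
  · rw [Option.map_map, Option.map_map]; rfl

-- no question matches s: ranks just shift
theorem bestP_shift (s : String) (rest : List String) (rem : List (List (String × String)))
    (h : ∀ q ∈ rem, ¬ stg q = s) :
    bestP (s :: rest) rem = (bestP rest rem).map (fun p => (p.1 + 1, p.2)) := by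
  induction rem with
  | nil => simp [bestP]
  | cons q t ih =>
    rw [bestP_cons, bestP_cons, sgl_cons, if_neg (h q (by simp)),
        ih (fun q hq => h q (by simp [hq])), mergeP_map_shift]

-- some question matches s: the first one wins with rank 0
theorem bestP_zero (s : String) (rest : List String) (rem : List (List (String × String)))
    (q0 : List (String × String)) (h : (rem.filter (fun q => stg q == s)).head? = some q0) :
    bestP (s :: rest) rem = some (0, q0) := by
  induction rem with
  | nil => simp at h
  | cons q t ih =>
    by_cases hq : stg q = s
    · rw [List.filter_cons_of_pos (by simpa using hq)] at h
      simp only [List.head?_cons, Option.some.injEq] at h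
      subst h
      rw [bestP_cons, sgl_cons, if_pos hq]
      rcases hb : bestP (s :: rest) t with _ | b
      · rfl
      · have := bestP_nonneg _ _ _ hb
        simp only [mergeP]
        rw [if_neg (by omega)]
    · rw [List.filter_cons_of_neg (by simpa using hq)] at h
      rw [bestP_cons, sgl_cons, if_neg hq, ih h]
      rcases hs : sgl rest q with _ | a
      · rfl
      · have ha : 0 ≤ a.1 := by
          rcases Option.map_eq_some_iff.mp hs with ⟨r', hr', rfl⟩
          exact rk_nonneg _ _ _ hr'
        simp only [Option.map_some, mergeP]
        rw [if_pos (by omega)]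

-- MAIN: the sequential per-stage scan equals the single-pass minimal-rank scan
theorem seqP_eq_bestP (ps : List String) (rem : List (List (String × String))) :
    seqP rem ps = (bestP ps rem).map (·.2) := by
  induction ps with
  | nil =>
    have : bestP [] rem = none := by
      induction rem with
      | nil => rfl
      | cons q t ih => rw [bestP_cons, ih]; rfl
    simp [seqP, this]
  | cons s rest ih =>
    simp only [seqP]
    rcases hf : (rem.filter (fun q => stg q == s)).head? with _ | q0
    · have hnil : rem.filter (fun q => stg q == s) = [] := by
        cases hfe : rem.filter (fun q => stg q == s) with
        | nil => rfl
        | cons a l => rw [hfe] at hf; simp at hf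
      have hall : ∀ q ∈ rem, ¬ stg q = s := by
        intro q hq
        have := List.filter_eq_nil_iff.mp hnil q hq
        simpa using this
      rw [if_neg (by simp [hnil]), ih, bestP_shift s rest rem hall, Option.map_map]
      rfl
    · have hne : rem.filter (fun q => stg q == s) ≠ [] := by
        intro hc; rw [hc] at hf; simp at hf
      rw [if_pos hne, bestP_zero s rest rem q0 hf]
      rfl

-- ===== port bridges =====

theorem filter_bridge (rem : List (List (String × String))) (s : String)
    (hpre : ∀ q ∈ rem, (stageGet q).isSome) :
    rem.filter (fun q => stageGet q == some s) = rem.filter (fun q => stg q == s) := by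
  apply List.filter_congr
  intro q hq
  rcases Option.isSome_iff_exists.mp (hpre q hq) with ⟨v, hv⟩
  simp [stg, hv]

theorem loopA_eq_seqP (rem : List (List (String × String)))
    (hpre : ∀ q ∈ rem, (stageGet q).isSome) :
    ∀ stages, pickLoopA rem stages = seqP rem stages := by
  intro stages
  induction stages with
  | nil => rfl
  | cons s rest ih => simp only [pickLoopA, seqP, filter_bridge rem s hpre, ih]

-- the dict {s: i+1 for i, s in enumerate(stages)} looks up the shifted first index, for each stage suffix
theorem laterOf_get_3 (s : String) :
    (laterOf ["approach", "experiments", "takeaways"]).get? s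
      = (rk ["approach", "experiments", "takeaways"] s).map (· + 1) := by
  by_cases h1 : s = "approach"
  · subst h1; rfl
  by_cases h2 : s = "experiments"
  · subst h2; rfl
  by_cases h3 : s = "takeaways"
  · subst h3; rfl
  have e : laterOf ["approach", "experiments", "takeaways"]
      = PySem.Dict.mk [("approach", 1), ("experiments", 2), ("takeaways", 3)] := rfl
  rw [e]
  simp only [PySem.Dict.get?_mk_cons, rk, beq_iff_eq]
  rw [if_neg (fun h => h1 h.symm), if_neg (fun h => h2 h.symm), if_neg (fun h => h3 h.symm),
      if_neg h1, if_neg h2, if_neg h3]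
  rfl

theorem laterOf_get_2 (s : String) :
    (laterOf ["experiments", "takeaways"]).get? s
      = (rk ["experiments", "takeaways"] s).map (· + 1) := by
  by_cases h2 : s = "experiments"
  · subst h2; rfl
  by_cases h3 : s = "takeaways"
  · subst h3; rfl
  have e : laterOf ["experiments", "takeaways"]
      = PySem.Dict.mk [("experiments", 1), ("takeaways", 2)] := rfl
  rw [e]
  simp only [PySem.Dict.get?_mk_cons, rk, beq_iff_eq]
  rw [if_neg (fun h => h2 h.symm), if_neg (fun h => h3 h.symm), if_neg h2, if_neg h3]
  rfl

theorem laterOf_get_1 (s : String) :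
    (laterOf ["takeaways"]).get? s = (rk ["takeaways"] s).map (· + 1) := by
  by_cases h3 : s = "takeaways"
  · subst h3; rfl
  have e : laterOf ["takeaways"] = PySem.Dict.mk [("takeaways", 1)] := rfl
  rw [e]
  simp only [PySem.Dict.get?_mk_cons, rk, beq_iff_eq]
  rw [if_neg (fun h => h3 h.symm), if_neg h3]
  rfl

theorem laterOf_get_0 (s : String) :
    (laterOf []).get? s = (rk [] s).map (· + 1) := by rfl

-- B's fold equals bestP when the dict realises the shifted rank of the drop part
theorem stepB_eq (cs : String) (drop : List String)
    (hdict : ∀ s, (laterOf drop).get? s = (rk drop s).map (· + 1))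
    (acc : Option (Int × List (String × String))) (q : List (String × String)) :
    stepB (laterOf drop) cs acc q = mergeP acc (sgl (cs :: drop) q) := by
  have hr : (if ((stageGet q).getD "") == cs then some (0 : Int)
      else (laterOf drop).get? ((stageGet q).getD "")) = rk (cs :: drop) (stg q) := by
    simp only [stg, rk, hdict, beq_iff_eq]
  simp only [stepB, hr, sgl]
  rcases rk (cs :: drop) (stg q) with _ | r <;> rcases acc with _ | ⟨rb, qb⟩ <;> rfl

theorem foldB_eq_bestP (rem : List (List (String × String))) (cs : String) (drop : List String)
    (hdict : ∀ s, (laterOf drop).get? s = (rk drop s).map (· + 1)) :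
    rem.foldl (stepB (laterOf drop) cs) none = bestP (cs :: drop) rem := by
  rw [bestP]
  exact PySem.List.foldl_congr_mem rem _ _ none (fun acc q _ => stepB_eq cs drop hdict acc q)

-- the two ports, written through seqP/bestP for a fixed drop part
theorem ports_eq_core (rem : List (List (String × String))) (cs : String)
    (hpre : ∀ q ∈ rem, (stageGet q).isSome)
    (hdict : ∀ s, (laterOf (STAGE_ORDER.drop (currentIdx cs + 1))).get? s
      = (rk (STAGE_ORDER.drop (currentIdx cs + 1)) s).map (· + 1)) :
    pick_primary_py rem cs = pick_primary_py_alt rem cs := by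
  have hA : pick_primary_py rem cs
      = match seqP rem (cs :: STAGE_ORDER.drop (currentIdx cs + 1)) with
        | some q => some q
        | none => rem.head? := by
    simp only [pick_primary_py, seqP, filter_bridge rem cs hpre, loopA_eq_seqP rem hpre]
    by_cases hf : rem.filter (fun q => stg q == cs) = []
    · simp [hf]
    · rcases hcons : rem.filter (fun q => stg q == cs) with _ | ⟨a, t⟩
      · exact absurd hcons hf
      · simp
  have hB : pick_primary_py_alt rem cs
      = match bestP (cs :: STAGE_ORDER.drop (currentIdx cs + 1)) rem with
        | some p => some p.2
        | none => rem.head? := by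
    simp only [pick_primary_py_alt, foldB_eq_bestP rem cs _ hdict]
    rcases bestP (cs :: STAGE_ORDER.drop (currentIdx cs + 1)) rem with _ | ⟨r, q⟩ <;> rfl
  rw [hA, hB, seqP_eq_bestP]
  rcases bestP (cs :: STAGE_ORDER.drop (currentIdx cs + 1)) rem with _ | p <;> rfl

-- ===== VERDICT (by name: the statement is the Claim_ definition above) =====
theorem pick_primary_py_spec : Claim_equal_pick_primary_py := by
  intro rem cs _ hpre
  unfold Spec_pick_primary_py
  have hpre' : ∀ q ∈ rem, (stageGet q).isSome := by
    intro q hq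
    have := (List.all_eq_true.mp hpre) q hq
    simpa using this
  by_cases h1 : cs = "motivation"
  · subst h1
    refine ports_eq_core rem _ hpre' (fun s => ?_)
    rw [show STAGE_ORDER.drop (currentIdx "motivation" + 1)
        = ["approach", "experiments", "takeaways"] from rfl]
    exact laterOf_get_3 s
  by_cases h2 : cs = "approach"
  · subst h2
    refine ports_eq_core rem _ hpre' (fun s => ?_)
    rw [show STAGE_ORDER.drop (currentIdx "approach" + 1) = ["experiments", "takeaways"] from rfl]
    exact laterOf_get_2 s
  by_cases h3 : cs = "experiments"
  · subst h3
    refine ports_eq_core rem _ hpre' (fun s => ?_)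
    rw [show STAGE_ORDER.drop (currentIdx "experiments" + 1) = ["takeaways"] from rfl]
    exact laterOf_get_1 s
  by_cases h4 : cs = "takeaways"
  · subst h4
    refine ports_eq_core rem _ hpre' (fun s => ?_)
    rw [show STAGE_ORDER.drop (currentIdx "takeaways" + 1) = [] from rfl]
    exact laterOf_get_0 s
  · have hnm : cs ∉ STAGE_ORDER := by simp [STAGE_ORDER, h1, h2, h3, h4]
    have hidx : currentIdx cs = 0 := by simp [currentIdx, hnm]
    refine ports_eq_core rem cs hpre' (fun s => ?_)
    rw [hidx, show STAGE_ORDER.drop (0 + 1) = ["approach", "experiments", "takeaways"] from rfl]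
    exact laterOf_get_3 s
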